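-- pv_equiv track=rewrite | github.com/shrikant10/py-code | codechef/2020_JAN/05_watching_cpl.py | solution
-- ===== SOURCE A (Python) =====
-- def solution(n, k, h):
--     asum = sum(h)
--     if n == 1 or asum < 2 * k: return -1
--     h.sort(reverse=True)
--     if asum == 2 * k:
--         if h[0] > k: return -1
--         if h[0] == k: return n
--     if h[0] >= k:
--         i, B = 1, 0
--         while i < n and B < k:
--             B += h[i]
--             i += 1
--         if B >= k: return i
--         return -1
--     mat = [[False] * (asum + 1)]
--     mat[0][0] = True
--
--     def find_min_diff(n, total, is_new, old_total):
--         for i in range(1, n + 1):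
--             if not is_new and i == n:
--                 old_total = 1
--             for j in range(old_total, total // 2 + 1):
--                 mat[i][j] = mat[i - 1][j]
--                 if h[i - 1] <= j:
--                     mat[i][j] = mat[i][j] or mat[i - 1][j - h[i - 1]]
--         for j in range(total // 2, k - 1, -1):
--             if mat[n][j]: return True
--         return False
--
--     total = 0
--     new = True
--     for i in range(n):
--         total += h[i]
--         mat.append([False] * (asum + 1))
--         mat[i + 1][0] = True
--         if total >= 2 * k:
--             old_total = 1 if new else (total - h[i]) // 2
--             if find_min_diff(i + 1, total, new, old_total):
--                 return i + 1
--             new = False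
--     return -1
-- ===== SOURCE B (Python) =====
-- def solution(n, k, h):
--     asum = sum(h)
--     if n == 1 or asum < 2 * k:
--         return -1
--     hs = sorted(h, reverse=True)
--     if asum == 2 * k:
--         if hs[0] > k:
--             return -1
--         if hs[0] == k:
--             return n
--     if hs[0] >= k:
--         i, B = 1, 0
--         while i < n and B < k:
--             B += hs[i]
--             i += 1
--         return i if B >= k else -1
--     # one-pass incremental subset-sum over the descending prefix
--     reach = {0}
--     total = 0
--     for i, x in enumerate(hs):
--         reach |= {s + x for s in reach}
--         total += x
--         if total >= 2 * k and any(k <= s <= total // 2 for s in reach):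
--             return i + 1
--     return -1
-- ===== Notes on version B (the rewrite author's own statement) =====
-- stated objective: alternative
-- what changed: B drops A's persistent (n+1)x(asum+1) boolean matrix and its find_min_diff routine that re-sweeps all rows for every prefix, and instead grows a single set of achievable subset sums by one union per element, testing for a sum in [k, total//2] each step; the cheap guard branches (sum checks, descending sort, greedy when the maximum already reaches k) are kept.
-- outside the precondition, e.g. on solution(2, 3, [2, 2, 2, 2]): A returns -1, B returns 4; on solution(4, 4, [3, 3, 3, -1]): A returns -1, B returns -1; on solution(3, 2, [5]): A raises IndexError, B raises IndexError
import Mathlib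
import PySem

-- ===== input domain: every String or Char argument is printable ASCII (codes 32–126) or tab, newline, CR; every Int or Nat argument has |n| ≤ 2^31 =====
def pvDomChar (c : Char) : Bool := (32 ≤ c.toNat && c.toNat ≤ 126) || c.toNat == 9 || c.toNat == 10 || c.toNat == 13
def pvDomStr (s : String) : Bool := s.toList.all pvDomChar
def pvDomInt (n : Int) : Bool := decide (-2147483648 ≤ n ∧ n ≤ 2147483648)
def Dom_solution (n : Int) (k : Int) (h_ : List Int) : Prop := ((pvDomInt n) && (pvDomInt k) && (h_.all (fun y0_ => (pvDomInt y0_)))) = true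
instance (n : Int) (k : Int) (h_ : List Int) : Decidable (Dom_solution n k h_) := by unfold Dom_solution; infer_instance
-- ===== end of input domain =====

-- B replaces A's persistent (n+1)x(asum+1) boolean table (whose rows find_min_diff re-sweeps
-- for every prefix) by a single incrementally-grown set of achievable subset sums, checked
-- against [k, total//2] once per element; the cheap guard branches are shared. A sorts h in
-- place while B sorts a copy; the equivalence proved here is about the return value.

-- ===== PORT A =====
def pvGetI (l : List Int) (i : Int) : Int := PySem.List.pyGetD l i 0

def pvRow (mat : List (List Bool)) (i : Int) : List Bool := PySem.List.pyGetD mat i []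

def pvGetC (mat : List (List Bool)) (i j : Int) : Bool := PySem.List.pyGetD (pvRow mat i) j false

def pvSetC (mat : List (List Bool)) (i j : Int) (v : Bool) : List (List Bool) :=
  PySem.List.pySetD mat i (PySem.List.pySetD (pvRow mat i) j v)

def pvInnerStep (h : List Int) (i : Int) (mat : List (List Bool)) (j : Int) : List (List Bool) :=
  let mat := pvSetC mat i j (pvGetC mat (i - 1) j)
  if pvGetI h (i - 1) ≤ j then
    pvSetC mat i j (pvGetC mat i j || pvGetC mat (i - 1) (j - pvGetI h (i - 1)))
  else mat

def pvInner (h : List Int) (i tot : Int) (start : Int) (mat : List (List Bool)) : List (List Bool) :=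
  (PySem.List.pyRange start (PySem.Int.floordiv tot 2 + 1) 1).foldl (pvInnerStep h i) mat

def pvFmdStep (h : List Int) (tot : Int) (isNew : Bool) (m : Int)
    (s : List (List Bool) × Int) (i : Int) : List (List Bool) × Int :=
  let ot := if !isNew && i == m then 1 else s.2
  (pvInner h i tot ot s.1, ot)

def pvFmd (h : List Int) (m tot : Int) (isNew : Bool) (oldTot : Int) (mat : List (List Bool))
    (k : Int) : List (List Bool) × Bool :=
  let st := (PySem.List.pyRange 1 (m + 1) 1).foldl (pvFmdStep h tot isNew m) (mat, oldTot)
  (st.1, (PySem.List.pyRange (PySem.Int.floordiv tot 2) (k - 1) (-1)).any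
    (fun j => pvGetC st.1 m j))

def pvGreedyA (h : List Int) (n k : Int) (i B : Int) : Int × Int :=
  if hc : i < n ∧ B < k then pvGreedyA h n k (i + 1) (B + pvGetI h i) else (i, B)
termination_by (n - i).toNat
decreasing_by omega

def pvOuterA (h : List Int) (k asum : Int) : List Int → List (List Bool) → Int → Bool → Int
  | [], _, _, _ => -1
  | i :: rest, mat, total, nw =>
    let total := total + pvGetI h i
    let mat := mat ++ [List.replicate (asum + 1).toNat false]
    let mat := pvSetC mat (i + 1) 0 true
    if 2 * k ≤ total then
      let ot := if nw then 1 else PySem.Int.floordiv (total - pvGetI h i) 2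
      let r := pvFmd h (i + 1) total nw ot mat k
      if r.2 then i + 1 else pvOuterA h k asum rest r.1 total false
    else pvOuterA h k asum rest mat total nw

def solution (n : Int) (k : Int) (h_ : List Int) : Int :=
  let asum := h_.sum
  if n == 1 || asum < 2 * k then -1
  else
    let h := PySem.List.sorted h_ (fun x => x) true
    let h0 := pvGetI h 0
    if asum == 2 * k && decide (k < h0) then -1
    else if asum == 2 * k && h0 == k then n
    else if k ≤ h0 then
      let r := pvGreedyA h n k 1 0
      if k ≤ r.2 then r.1 else -1
    else
      let mat := [PySem.List.pySetD (List.replicate (asum + 1).toNat false) 0 true]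
      pvOuterA h k asum (PySem.List.pyRange 0 n 1) mat 0 true

-- ===== PORT B =====
def pvGreedyB (h : List Int) (n k : Int) (i B : Int) : Int × Int :=
  if hc : i < n ∧ B < k then pvGreedyB h n k (i + 1) (B + pvGetI h i) else (i, B)
termination_by (n - i).toNat
decreasing_by omega

def pvAltLoop (k : Int) : List Int → Int → PySem.Set Int → Int → Int
  | [], _, _, _ => -1
  | x :: rest, i, reach, total =>
    let reach := PySem.Set.union reach (reach.map (fun s => s + x))
    let total := total + x
    if 2 * k ≤ total &&
        reach.any (fun s => decide (k ≤ s) && decide (s ≤ PySem.Int.floordiv total 2)) then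
      i + 1
    else pvAltLoop k rest (i + 1) reach total

def solution_alt (n : Int) (k : Int) (h_ : List Int) : Int :=
  let asum := h_.sum
  if n == 1 || asum < 2 * k then -1
  else
    let hs := PySem.List.sorted h_ (fun x => x) true
    let h0 := pvGetI hs 0
    if asum == 2 * k && decide (k < h0) then -1
    else if asum == 2 * k && h0 == k then n
    else if k ≤ h0 then
      let r := pvGreedyB hs n k 1 0
      if k ≤ r.2 then r.1 else -1
    else pvAltLoop k hs 0 (PySem.Set.ofList [0]) 0

-- ===== PRECONDITION & SPEC =====
-- Pre_ admits every input that exits through the shared front branches (n == 1, sum < 2k,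
-- or some entry already ≥ k, with h nonempty) plus the problem's full natural domain
-- (n = len(h), nonnegative win counts); the third conjunct of the middle disjunct keeps out
-- greedy runs that index past len(h) (A raises IndexError there). Also excluded: h = []
-- reaching h[0] (IndexError), and the subset-sum search reached with n ≠ len(h) or negative
-- counts, where A's value rests on the mismatched count, which B does not reproduce.
def Pre_solution (n : Int) (k : Int) (h_ : List Int) : Prop :=
  (n = 1 ∨ h_.sum < 2 * k) ∨
    (h_ ≠ [] ∧ (∃ x ∈ h_, k ≤ x) ∧
      (n ≤ h_.length ∨ h_.sum = 2 * k ∨ ∀ x ∈ h_, k + x ≤ h_.sum)) ∨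
    (n = h_.length ∧ 1 ≤ n ∧ ∀ x ∈ h_, 0 ≤ x)
instance (n : Int) (k : Int) (h_ : List Int) : Decidable (Pre_solution n k h_) := by
  unfold Pre_solution; infer_instance

def pvWitness_solution : Int × Int × List Int := (3, 4, [3, 3, 3])

def Spec_solution (n : Int) (k : Int) (h_ : List Int) (out : Int) : Prop := out = solution_alt n k h_
instance (n : Int) (k : Int) (h_ : List Int) (out : Int) : Decidable (Spec_solution n k h_ out) := by unfold Spec_solution; infer_instance

-- ===== CLAIM (what is proved, stated in full; the proofs are below) =====
def Claim_equal_solution : Prop := ∀ (n : Int) (k : Int) (h_ : List Int), Dom_solution n k h_ → Pre_solution n k h_ → Spec_solution n k h_ (solution n k h_)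

-- ===== LEMMAS AND PROOFS =====

def rch (h : List Int) : Nat → Int → Bool
  | 0, j => j == 0
  | i + 1, j =>
    rch h i j || (decide (pvGetI h (i : Int) ≤ j) && rch h i (j - pvGetI h (i : Int)))

lemma pyGetD_toNat {α : Type} (xs : List α) (i : Int) (d : α) (hi : 0 ≤ i) :
    PySem.List.pyGetD xs i d = xs[i.toNat]?.getD d := by
  have h : i = ((i.toNat : Nat) : Int) := by omega
  conv_lhs => rw [h, PySem.List.pyGetD_natCast]
  simp [List.getD]

lemma pvGetI_eq (l : List Int) (i : Int) (hi : 0 ≤ i) : pvGetI l i = l[i.toNat]?.getD 0 := by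
  simp [pvGetI, pyGetD_toNat _ _ _ hi]

lemma pvGetI_nonneg (l : List Int) (hl : ∀ x ∈ l, 0 ≤ x) (i : Int) (hi : 0 ≤ i) :
    0 ≤ pvGetI l i := by
  rw [pvGetI_eq _ _ hi]
  rcases Nat.lt_or_ge i.toNat l.length with h | h
  · simpa [List.getElem?_eq_getElem h] using hl _ (l.getElem_mem h)
  · simp [List.getElem?_eq_none (by omega : l.length ≤ i.toNat)]

lemma pvGetC_eq (mat : List (List Bool)) (i j : Int) (hi : 0 ≤ i) (hj : 0 ≤ j) :
    pvGetC mat i j = ((mat[i.toNat]?.getD []) : List Bool)[j.toNat]?.getD false := by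
  simp [pvGetC, pvRow, pyGetD_toNat _ _ _ hi, pyGetD_toNat _ _ _ hj]

lemma pvSetC_eq (mat : List (List Bool)) (i j : Int) (v : Bool) (hi : 0 ≤ i) (hj : 0 ≤ j) :
    pvSetC mat i j v = mat.set i.toNat ((mat[i.toNat]?.getD []).set j.toNat v) := by
  rw [pvSetC, PySem.List.pySetD_of_nonneg (h := hi), PySem.List.pySetD_of_nonneg (h := hj)]
  simp [pvRow, pyGetD_toNat _ _ _ hi]

lemma length_pvSetC (mat : List (List Bool)) (i j : Int) (v : Bool) :
    (pvSetC mat i j v).length = mat.length := by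
  simp [pvSetC, PySem.List.length_pySetD]

-- reading after a (in-range) write

lemma pvGetC_pvSetC (mat : List (List Bool)) (i j : Int) (v : Bool)
    (hi : 0 ≤ i) (hj : 0 ≤ j) (hilen : i.toNat < mat.length)
    (hjlen : j.toNat < (mat[i.toNat]?.getD []).length)
    (i' j' : Int) (hi' : 0 ≤ i') (hj' : 0 ≤ j') :
    pvGetC (pvSetC mat i j v) i' j' =
      if i' = i ∧ j' = j then v else pvGetC mat i' j' := by
  rw [pvSetC_eq _ _ _ _ hi hj, pvGetC_eq _ _ _ hi' hj', pvGetC_eq _ _ _ hi' hj']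
  by_cases hii : i'.toNat = i.toNat
  · rw [hii, List.getElem?_set_self hilen, Option.getD_some]
    by_cases hjj : j'.toNat = j.toNat
    · have he : i' = i ∧ j' = j := by omega
      rw [hjj, List.getElem?_set_self hjlen, Option.getD_some, if_pos he]
    · have hne : ¬ (i' = i ∧ j' = j) := by omega
      rw [List.getElem?_set_ne (by omega), if_neg hne]
  · have hne : ¬ (i' = i ∧ j' = j) := by omega
    rw [List.getElem?_set_ne (by omega), if_neg hne]

-- subset-sum reachability over the first i elements (A's DP recurrence, B's set contents)

lemma rch_zero (h : List Int) (i : Nat) : rch h i 0 = true := by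
  induction i with
  | zero => simp [rch]
  | succ i ih => simp [rch, ih]

lemma rch_nonneg (h : List Int) (hl : ∀ x ∈ h, 0 ≤ x) (i : Nat) (j : Int)
    (hr : rch h i j = true) : 0 ≤ j := by
  induction i generalizing j with
  | zero => simp [rch] at hr; omega
  | succ i ih =>
    simp only [rch, Bool.or_eq_true, Bool.and_eq_true, decide_eq_true_eq] at hr
    rcases hr with hr | ⟨hle, hr⟩
    · exact ih _ hr
    · have := pvGetI_nonneg h hl (i : Int) (by omega)
      omega

-- B's per-element set update keeps "membership = reachability"

lemma reach_step (h : List Int) (hl : ∀ x ∈ h, 0 ≤ x) (p : Nat) (hp : p < h.length)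
    (reach : PySem.Set Int)
    (hmem : ∀ j : Int, j ∈ reach ↔ rch h p j = true) (j : Int) :
    j ∈ PySem.Set.union reach (reach.map (fun s => s + pvGetI h (p : Int))) ↔
      rch h (p + 1) j = true := by
  set x := pvGetI h (p : Int) with hx
  have hx0 : 0 ≤ x := pvGetI_nonneg h hl _ (by omega)
  rw [PySem.Set.mem_union]
  simp only [List.mem_map, rch, Bool.or_eq_true, Bool.and_eq_true, decide_eq_true_eq]
  constructor
  · rintro (hj | ⟨y, hy, rfl⟩)
    · exact Or.inl ((hmem j).1 hj)
    · have hyr := (hmem y).1 hy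
      have hy0 : 0 ≤ y := rch_nonneg h hl _ _ hyr
      right
      refine ⟨by omega, ?_⟩
      rw [← hx]
      have he : y + x - x = y := by ring
      rw [he]
      exact hyr
  · rintro (hj | ⟨hle, hr⟩)
    · exact Or.inl ((hmem j).2 hj)
    · exact Or.inr ⟨j - x, (hmem _).2 hr, by ring⟩

-- the downward scan of find_min_diff is an existence test on [k, T]

lemma any_countdown (T kk : Int) (p : Int → Bool) :
    ((PySem.List.pyRange T (kk - 1) (-1)).any p = true) ↔
      ∃ j : Int, kk ≤ j ∧ j ≤ T ∧ p j = true := by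
  rw [List.any_eq_true]
  constructor
  · rintro ⟨j, hj, hp⟩
    rw [PySem.List.mem_pyRange_neg_one] at hj
    exact ⟨j, by omega, by omega, hp⟩
  · rintro ⟨j, h1, h2, hp⟩
    exact ⟨j, by rw [PySem.List.mem_pyRange_neg_one]; omega, hp⟩

lemma row_len (mat : List (List Bool)) (W : Nat) (hW : ∀ ro ∈ mat, ro.length = W)
    (r : Nat) (hr : r < mat.length) : (mat[r]?.getD []).length = W := by
  rw [List.getElem?_eq_getElem hr, Option.getD_some]
  exact hW _ (mat.getElem_mem hr)

lemma inner_step (h : List Int) (hnn : ∀ x ∈ h, 0 ≤ x) (W : Nat) (tot : Int)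
    (hTW : PySem.Int.floordiv tot 2 < (W : Int)) (r : Nat) (hr1 : 1 ≤ r)
    (a : Int) (mat : List (List Bool)) (ha : 1 ≤ a) (haT : a ≤ PySem.Int.floordiv tot 2)
    (hrlen : r < mat.length) (hW : ∀ ro ∈ mat, ro.length = W)
    (hprev : ∀ j : Int, 0 ≤ j → j ≤ PySem.Int.floordiv tot 2 →
      pvGetC mat ((r : Int) - 1) j = rch h (r - 1) j) :
    pvInnerStep h (r : Int) mat a = pvSetC mat (r : Int) a (rch h r a) := by
  have hcast : ((r : Int) - 1) = ((r - 1 : Nat) : Int) := by omega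
  have hrtn : ((r : Int)).toNat = r := by omega
  have hrowlen : (mat[((r : Int)).toNat]?.getD []).length = W := by
    rw [hrtn]; exact row_len mat W hW r hrlen
  have hain : a.toNat < (mat[((r : Int)).toNat]?.getD []).length := by
    rw [hrowlen]; omega
  have hrin : ((r : Int)).toNat < mat.length := by rw [hrtn]; exact hrlen
  have hv0 : 0 ≤ pvGetI h ((r : Int) - 1) := pvGetI_nonneg h hnn _ (by omega)
  have hc0 : pvGetC mat ((r : Int) - 1) a = rch h (r - 1) a := hprev a (by omega) haT
  rw [pvInnerStep]
  set hv := pvGetI h ((r : Int) - 1) with hhv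
  have hget1 : pvGetC (pvSetC mat (r : Int) a (pvGetC mat ((r : Int) - 1) a)) (r : Int) a
      = rch h (r - 1) a := by
    rw [pvGetC_pvSetC mat _ _ _ (by omega) (by omega) hrin hain _ _ (by omega) (by omega)]
    simp [hc0]
  have hrsucc : r = (r - 1) + 1 := by omega
  by_cases hg : hv ≤ a
  · rw [if_pos hg]
    have hget2 : pvGetC (pvSetC mat (r : Int) a (pvGetC mat ((r : Int) - 1) a)) ((r : Int) - 1) (a - hv)
        = rch h (r - 1) (a - hv) := by
      rw [pvGetC_pvSetC mat _ _ _ (by omega) (by omega) hrin hain _ _ (by omega) (by omega)]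
      rw [if_neg (by omega)]
      exact hprev _ (by omega) (by omega)
    rw [hget1, hget2]
    -- collapse the double write into one
    have hval : (rch h (r - 1) a || rch h (r - 1) (a - hv)) = rch h r a := by
      conv_rhs => rw [hrsucc]
      simp only [rch, ← hcast, ← hhv]
      rw [decide_eq_true hg]
      simp
    rw [pvSetC_eq _ _ _ _ (by omega) (by omega), pvSetC_eq _ _ _ _ (by omega) (by omega),
      pvSetC_eq _ _ _ _ (by omega) (by omega)]
    rw [List.getElem?_set_self hrin, Option.getD_some, List.set_set, List.set_set, hval]
  · rw [if_neg hg]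
    have hval : rch h (r - 1) a = rch h r a := by
      conv_rhs => rw [hrsucc]
      simp only [rch, ← hcast, ← hhv]
      rw [decide_eq_false (by omega)]
      simp
    rw [hc0, hval]

lemma inner_spec (h : List Int) (hnn : ∀ x ∈ h, 0 ≤ x) (W : Nat) (tot : Int)
    (hTW : PySem.Int.floordiv tot 2 < (W : Int)) (r : Nat) (hr1 : 1 ≤ r) :
    ∀ (fuel : Nat) (a : Int) (mat : List (List Bool)),
    (PySem.Int.floordiv tot 2 + 1 - a).toNat ≤ fuel → 1 ≤ a →
    r < mat.length → (∀ ro ∈ mat, ro.length = W) →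
    (∀ j : Int, 0 ≤ j → j ≤ PySem.Int.floordiv tot 2 →
      pvGetC mat ((r : Int) - 1) j = rch h (r - 1) j) →
    (pvInner h (r : Int) tot a mat).length = mat.length ∧
    (∀ ro ∈ pvInner h (r : Int) tot a mat, ro.length = W) ∧
    (∀ i' : Int, 0 ≤ i' → i' ≠ (r : Int) → ∀ j : Int, 0 ≤ j →
      pvGetC (pvInner h (r : Int) tot a mat) i' j = pvGetC mat i' j) ∧
    (∀ j : Int, a ≤ j → j ≤ PySem.Int.floordiv tot 2 →
      pvGetC (pvInner h (r : Int) tot a mat) (r : Int) j = rch h r j) ∧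
    (∀ j : Int, 0 ≤ j → j < a →
      pvGetC (pvInner h (r : Int) tot a mat) (r : Int) j = pvGetC mat (r : Int) j) := by
  intro fuel
  induction fuel with
  | zero =>
    intro a mat hfu ha hrlen hW hprev
    have hend : PySem.Int.floordiv tot 2 + 1 ≤ a := by omega
    rw [pvInner, PySem.List.pyRange_one_eq_nil (by omega)]
    refine ⟨rfl, hW, fun _ _ _ _ _ => rfl, fun j hj1 hj2 => by omega, fun _ _ _ => rfl⟩
  | succ fuel ih =>
    intro a mat hfu ha hrlen hW hprev
    by_cases hend : PySem.Int.floordiv tot 2 + 1 ≤ a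
    · rw [pvInner, PySem.List.pyRange_one_eq_nil (by omega)]
      refine ⟨rfl, hW, fun _ _ _ _ _ => rfl, fun j hj1 hj2 => by omega, fun _ _ _ => rfl⟩
    · have haT : a ≤ PySem.Int.floordiv tot 2 := by omega
      rw [pvInner, PySem.List.pyRange_one_cons (by omega), List.foldl_cons]
      rw [inner_step h hnn W tot hTW r hr1 a mat ha haT hrlen hW hprev]
      have htail : ∀ m : List (List Bool),
          (PySem.List.pyRange (a + 1) (PySem.Int.floordiv tot 2 + 1) 1).foldl
            (pvInnerStep h (r : Int)) m = pvInner h (r : Int) tot (a + 1) m := fun _ => rfl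
      rw [htail]
      set mat1 := pvSetC mat (r : Int) a (rch h r a) with hmat1
      have hrtn : ((r : Int)).toNat = r := by omega
      have hrin : ((r : Int)).toNat < mat.length := by omega
      have hain : a.toNat < (mat[((r : Int)).toNat]?.getD []).length := by
        rw [hrtn, row_len mat W hW r hrlen]; omega
      have hlen1 : mat1.length = mat.length := length_pvSetC _ _ _ _
      have hW1 : ∀ ro ∈ mat1, ro.length = W := by
        rw [hmat1, pvSetC_eq _ _ _ _ (by omega) (by omega)]
        intro ro hro
        rcases List.mem_or_eq_of_mem_set hro with hro | rfl
        · exact hW _ hro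
        · rw [List.length_set]
          rw [hrtn] at *
          exact row_len mat W hW r hrlen
      have hget1 : ∀ i' j' : Int, 0 ≤ i' → 0 ≤ j' →
          pvGetC mat1 i' j' = if i' = (r : Int) ∧ j' = a then rch h r a else pvGetC mat i' j' := by
        intro i' j' hi' hj'
        rw [hmat1, pvGetC_pvSetC mat _ _ _ (by omega) (by omega) hrin hain _ _ hi' hj']
      obtain ⟨ihlen, ihW, ihother, ihnew, ihold⟩ :=
        ih (a + 1) mat1 (by omega) (by omega) (by omega) hW1
          (by
            intro j hj1 hj2
            rw [hget1 _ _ (by omega) hj1, if_neg (by omega)]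
            exact hprev j hj1 hj2)
      refine ⟨by rw [ihlen, hlen1], ihW, ?_, ?_, ?_⟩
      · intro i' hi' hne j hj
        rw [ihother i' hi' hne j hj, hget1 _ _ hi' hj, if_neg (by omega)]
      · intro j hj1 hj2
        by_cases hja : j = a
        · subst hja
          rw [ihold j (by omega) (by omega), hget1 _ _ (by omega) (by omega), if_pos ⟨rfl, rfl⟩]
        · exact ihnew j (by omega) hj2
      · intro j hj1 hj2
        rw [ihold j hj1 (by omega), hget1 _ _ (by omega) hj1, if_neg (by omega)]

lemma rows_fold (h : List Int) (hnn : ∀ x ∈ h, 0 ≤ x) (W : Nat) (tot : Int)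
    (hTW : PySem.Int.floordiv tot 2 < (W : Int)) (m : Nat) (hm : 1 ≤ m)
    (isNew : Bool) (ot : Int) (hot1 : 1 ≤ ot) (hotT : ot ≤ PySem.Int.floordiv tot 2)
    (hNew : isNew = true → ot = 1)
    (mat0 : List (List Bool)) (hlen0 : mat0.length = m + 1)
    (hW0 : ∀ ro ∈ mat0, ro.length = W)
    (hrow0 : ∀ j : Int, 0 ≤ j → j < (W : Int) → pvGetC mat0 0 j = rch h 0 j)
    (hmid : ∀ r : Nat, 1 ≤ r → r < m → ∀ j : Int, 0 ≤ j → j ≤ ot - 1 →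
      pvGetC mat0 (r : Int) j = rch h r j)
    (hlast : pvGetC mat0 (m : Int) 0 = rch h m 0) :
    ∀ u : Nat, u ≤ m →
    (u < m → ((PySem.List.pyRange 1 ((u : Int) + 1) 1).foldl
        (pvFmdStep h tot isNew (m : Int)) (mat0, ot)).2 = ot) ∧
    ((PySem.List.pyRange 1 ((u : Int) + 1) 1).foldl
        (pvFmdStep h tot isNew (m : Int)) (mat0, ot)).1.length = m + 1 ∧
    (∀ ro ∈ ((PySem.List.pyRange 1 ((u : Int) + 1) 1).foldl
        (pvFmdStep h tot isNew (m : Int)) (mat0, ot)).1, ro.length = W) ∧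
    (∀ j : Int, 0 ≤ j → pvGetC ((PySem.List.pyRange 1 ((u : Int) + 1) 1).foldl
        (pvFmdStep h tot isNew (m : Int)) (mat0, ot)).1 0 j = pvGetC mat0 0 j) ∧
    (∀ r : Nat, 1 ≤ r → r ≤ u → ∀ j : Int, 0 ≤ j → j ≤ PySem.Int.floordiv tot 2 →
      pvGetC ((PySem.List.pyRange 1 ((u : Int) + 1) 1).foldl
        (pvFmdStep h tot isNew (m : Int)) (mat0, ot)).1 (r : Int) j = rch h r j) ∧
    (∀ r : Nat, u < r → ∀ j : Int, 0 ≤ j →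
      pvGetC ((PySem.List.pyRange 1 ((u : Int) + 1) 1).foldl
        (pvFmdStep h tot isNew (m : Int)) (mat0, ot)).1 (r : Int) j = pvGetC mat0 (r : Int) j) := by
  intro u
  induction u with
  | zero =>
    intro _
    rw [show ((0 : Nat) : Int) + 1 = 1 by norm_num, PySem.List.pyRange_one_eq_nil (by omega)]
    exact ⟨fun _ => rfl, hlen0, hW0, fun _ _ => rfl, fun r hr1 hr2 => by omega,
      fun _ _ _ _ => rfl⟩
  | succ u ih =>
    intro hum
    obtain ⟨ihsnd, ihlen, ihW, ihrow0, ihdone, ihrest⟩ := ih (by omega)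
    have hsplit : PySem.List.pyRange 1 (((u + 1 : Nat) : Int) + 1) 1 =
        PySem.List.pyRange 1 ((u : Int) + 1) 1 ++ [(u : Int) + 1] := by
      push_cast
      exact PySem.List.pyRange_one_succ_right (by omega)
    rw [hsplit, List.foldl_append]
    set st := (PySem.List.pyRange 1 ((u : Int) + 1) 1).foldl
      (pvFmdStep h tot isNew (m : Int)) (mat0, ot) with hst
    have hsnd : st.2 = ot := by
      rcases Nat.lt_or_ge u m with h' | h'
      · exact ihsnd h'
      · omega
    rw [List.foldl_cons, List.foldl_nil, pvFmdStep]
    set ot' := if (!isNew && ((u : Int) + 1 == (m : Int))) = true then (1 : Int) else st.2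
      with hot'
    have hcastu : ((u + 1 : Nat) : Int) = (u : Int) + 1 := by push_cast; ring
    have hot'cases : (u + 1 < m ∧ ot' = ot) ∨ (u + 1 = m ∧ ot' = 1) := by
      rcases Nat.lt_or_ge (u + 1) m with h' | h'
      · left
        refine ⟨h', ?_⟩
        have hne : ((u : Int) + 1 == (m : Int)) = false := by
          simp only [beq_eq_false_iff_ne, ne_eq]
          omega
        rw [hot', hne]
        simp [hsnd]
      · right
        have hue : u + 1 = m := by omega
        refine ⟨hue, ?_⟩
        cases hNewCase : isNew with
        | true =>
          rw [hot', hNewCase, hsnd, hNew hNewCase]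
          simp
        | false =>
          have heq : ((u : Int) + 1 == (m : Int)) = true := by
            simp only [beq_iff_eq]
            omega
          rw [hot', heq, hNewCase]
          simp
    have hot'1 : 1 ≤ ot' := by rcases hot'cases with ⟨_, h'⟩ | ⟨_, h'⟩ <;> omega
    have hprev : ∀ j : Int, 0 ≤ j → j ≤ PySem.Int.floordiv tot 2 →
        pvGetC st.1 (((u + 1 : Nat) : Int) - 1) j = rch h u j := by
      intro j hj1 hj2
      rw [show ((u + 1 : Nat) : Int) - 1 = (u : Int) by push_cast; ring]
      rcases Nat.eq_zero_or_pos u with rfl | hu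
      · rw [show ((0 : Nat) : Int) = 0 from rfl, ihrow0 j hj1]
        exact hrow0 j hj1 (by omega)
      · exact ihdone u hu (le_refl u) j hj1 hj2
    obtain ⟨slen, sW, sother, snew, sold⟩ :=
      inner_spec h hnn W tot hTW (u + 1) (by omega)
        ((PySem.Int.floordiv tot 2 + 1 - ot').toNat) ot' st.1 (le_refl _) hot'1
        (by rw [ihlen]; omega) ihW hprev
    have hcor : ∀ r : Nat, 1 ≤ r → r ≤ u + 1 → ∀ j : Int, 0 ≤ j →
        j ≤ PySem.Int.floordiv tot 2 →
        pvGetC (pvInner h ((u + 1 : Nat) : Int) tot ot' st.1) (r : Int) j = rch h r j := by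
      intro r hr1 hr2 j hj1 hj2
      rcases Nat.lt_or_ge r (u + 1) with hrlt | hrge
      · rw [sother (r : Int) (by omega) (by omega) j hj1]
        exact ihdone r hr1 (by omega) j hj1 hj2
      · have hre : r = u + 1 := by omega
        subst hre
        rcases Int.lt_or_le j ot' with hjo | hjo
        · rw [sold j hj1 hjo]
          rcases hot'cases with ⟨hlt, h'⟩ | ⟨heq, h'⟩
          · rw [h'] at hjo
            rw [ihrest (u + 1) (by omega) j hj1]
            exact hmid (u + 1) (by omega) hlt j hj1 (by omega)
          · rw [h'] at hjo
            have hj0 : j = 0 := by omega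
            subst hj0
            rw [ihrest (u + 1) (by omega) 0 (by omega)]
            rw [← heq] at hlast
            exact hlast
        · exact snew j hjo hj2
    refine ⟨?_, ?_, ?_, ?_, ?_, ?_⟩
    · intro hlt
      show ot' = ot
      rcases hot'cases with ⟨_, h'⟩ | ⟨heq, _⟩
      · exact h'
      · omega
    · show (pvInner h ((u : Int) + 1) tot ot' st.1).length = m + 1
      rw [← hcastu, slen, ihlen]
    · show ∀ ro ∈ pvInner h ((u : Int) + 1) tot ot' st.1, ro.length = W
      rw [← hcastu]
      exact sW
    · intro j hj1
      show pvGetC (pvInner h ((u : Int) + 1) tot ot' st.1) 0 j = pvGetC mat0 0 j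
      rw [← hcastu, sother 0 (by omega) (by omega) j hj1]
      exact ihrow0 j hj1
    · intro r hr1 hr2 j hj1 hj2
      show pvGetC (pvInner h ((u : Int) + 1) tot ot' st.1) (r : Int) j = rch h r j
      rw [← hcastu]
      exact hcor r hr1 hr2 j hj1 hj2
    · intro r hr j hj1
      show pvGetC (pvInner h ((u : Int) + 1) tot ot' st.1) (r : Int) j = pvGetC mat0 (r : Int) j
      rw [← hcastu, sother (r : Int) (by omega) (by omega) j hj1]
      exact ihrest r (by omega) j hj1

lemma fmd_spec (h : List Int) (hnn : ∀ x ∈ h, 0 ≤ x) (W : Nat) (tot : Int)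
    (hTW : PySem.Int.floordiv tot 2 < (W : Int)) (m : Nat) (hm : 1 ≤ m)
    (isNew : Bool) (ot : Int) (hot1 : 1 ≤ ot) (hotT : ot ≤ PySem.Int.floordiv tot 2)
    (hNew : isNew = true → ot = 1)
    (mat0 : List (List Bool)) (hlen0 : mat0.length = m + 1)
    (hW0 : ∀ ro ∈ mat0, ro.length = W)
    (hrow0 : ∀ j : Int, 0 ≤ j → j < (W : Int) → pvGetC mat0 0 j = rch h 0 j)
    (hmid : ∀ r : Nat, 1 ≤ r → r < m → ∀ j : Int, 0 ≤ j → j ≤ ot - 1 →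
      pvGetC mat0 (r : Int) j = rch h r j)
    (hlast : pvGetC mat0 (m : Int) 0 = rch h m 0)
    (k : Int) (hk : 1 ≤ k) :
    (pvFmd h (m : Int) tot isNew ot mat0 k).1.length = m + 1 ∧
    (∀ ro ∈ (pvFmd h (m : Int) tot isNew ot mat0 k).1, ro.length = W) ∧
    (∀ j : Int, 0 ≤ j → pvGetC (pvFmd h (m : Int) tot isNew ot mat0 k).1 0 j = pvGetC mat0 0 j) ∧
    (∀ r : Nat, 1 ≤ r → r ≤ m → ∀ j : Int, 0 ≤ j → j ≤ PySem.Int.floordiv tot 2 →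
      pvGetC (pvFmd h (m : Int) tot isNew ot mat0 k).1 (r : Int) j = rch h r j) ∧
    ((pvFmd h (m : Int) tot isNew ot mat0 k).2 = true ↔
      ∃ j : Int, k ≤ j ∧ j ≤ PySem.Int.floordiv tot 2 ∧ rch h m j = true) := by
  obtain ⟨_, flen, fW, frow0, fdone, _⟩ :=
    rows_fold h hnn W tot hTW m hm isNew ot hot1 hotT hNew mat0 hlen0 hW0 hrow0 hmid hlast
      m (le_refl m)
  rw [pvFmd]
  refine ⟨flen, fW, frow0, fdone, ?_⟩
  rw [any_countdown]
  constructor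
  · rintro ⟨j, hj1, hj2, hj3⟩
    refine ⟨j, hj1, hj2, ?_⟩
    rw [← fdone m hm (le_refl m) j (by omega) hj2]
    exact hj3
  · rintro ⟨j, hj1, hj2, hj3⟩
    refine ⟨j, hj1, hj2, ?_⟩
    rw [fdone m hm (le_refl m) j (by omega) hj2]
    exact hj3

lemma sum_take_nonneg (h : List Int) (hnn : ∀ x ∈ h, 0 ≤ x) (p : Nat) : 0 ≤ (h.take p).sum :=
  List.sum_nonneg (fun x hx => hnn x (List.mem_of_mem_take hx))

lemma sum_take_le (h : List Int) (hnn : ∀ x ∈ h, 0 ≤ x) (p : Nat) : (h.take p).sum ≤ h.sum := by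
  have := List.sum_take_add_sum_drop h p
  have hd : 0 ≤ (h.drop p).sum := List.sum_nonneg (fun x hx => hnn x (List.mem_of_mem_drop hx))
  omega

lemma sum_take_succ (h : List Int) (p : Nat) (hp : p < h.length) :
    (h.take (p + 1)).sum = (h.take p).sum + h[p] := by
  rw [List.take_succ_eq_append_getElem hp, List.sum_append, List.sum_cons, List.sum_nil]
  ring

lemma floordiv_two_mono {a b : Int} (hab : a ≤ b) :
    PySem.Int.floordiv a 2 ≤ PySem.Int.floordiv b 2 := by
  rw [PySem.Int.le_floordiv_iff_mul_le (by norm_num)]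
  have h1 := PySem.Int.floordiv_mul_add_mod a 2
  have h2 := PySem.Int.mod_nonneg a (by norm_num : (0:Int) < 2)
  omega

lemma floordiv_two_le_self {a : Int} (ha : 0 ≤ a) : PySem.Int.floordiv a 2 ≤ a := by
  have h1 := PySem.Int.floordiv_mul_add_mod a 2
  have h2 := PySem.Int.mod_nonneg a (by norm_num : (0:Int) < 2)
  have h3 := PySem.Int.mod_lt a (by norm_num : (0:Int) < 2)
  omega

lemma floordiv_two_nonneg {a : Int} (ha : 0 ≤ a) : 0 ≤ PySem.Int.floordiv a 2 := by
  rw [PySem.Int.le_floordiv_iff_mul_le (by norm_num)]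
  omega

lemma step_mat (W : Nat) (hW1 : 1 ≤ W) (mat : List (List Bool)) (p : Nat)
    (hlen : mat.length = p + 1) (hWr : ∀ ro ∈ mat, ro.length = W) :
    (pvSetC (mat ++ [List.replicate W false]) ((p : Int) + 1) 0 true).length = p + 2 ∧
    (∀ ro ∈ pvSetC (mat ++ [List.replicate W false]) ((p : Int) + 1) 0 true, ro.length = W) ∧
    (∀ i' : Int, 0 ≤ i' → i' ≤ (p : Int) → ∀ j : Int, 0 ≤ j →
      pvGetC (pvSetC (mat ++ [List.replicate W false]) ((p : Int) + 1) 0 true) i' j =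
        pvGetC mat i' j) ∧
    pvGetC (pvSetC (mat ++ [List.replicate W false]) ((p : Int) + 1) 0 true) ((p : Int) + 1) 0 = true := by
  have hlen' : (mat ++ [List.replicate W false]).length = p + 2 := by
    simp [hlen]
  have hin : ((p : Int) + 1).toNat < (mat ++ [List.replicate W false]).length := by
    rw [hlen']; omega
  have hrow : ((mat ++ [List.replicate W false])[((p : Int) + 1).toNat]?.getD []) =
      List.replicate W false := by
    have hidx : ((p : Int) + 1).toNat = p + 1 := by omega
    rw [hidx, List.getElem?_append_right (by omega), hlen]
    simp
  have hjin : (0 : Int).toNat < ((mat ++ [List.replicate W false])[((p : Int) + 1).toNat]?.getD []).length := by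
    rw [hrow]; simp; omega
  refine ⟨?_, ?_, ?_, ?_⟩
  · rw [length_pvSetC, hlen']
  · rw [pvSetC_eq _ _ _ _ (by omega) (by omega)]
    intro ro hro
    rcases List.mem_or_eq_of_mem_set hro with hro | rfl
    · rcases List.mem_append.1 hro with hro | hro
      · exact hWr _ hro
      · simp at hro
        simp [hro]
    · rw [List.length_set, hrow]
      simp
  · intro i' hi' hip j hj
    rw [pvGetC_pvSetC _ _ _ _ (by omega) (by omega) hin hjin _ _ hi' hj, if_neg (by omega)]
    rw [pvGetC_eq _ _ _ hi' hj, pvGetC_eq _ _ _ hi' hj]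
    rw [List.getElem?_append_left (by omega : i'.toNat < mat.length)]
  · rw [pvGetC_pvSetC _ _ _ _ (by omega) (by omega) hin hjin _ _ (by omega) (by omega),
      if_pos ⟨rfl, rfl⟩]

lemma outer_eq (h : List Int) (hnn : ∀ x ∈ h, 0 ≤ x) (k : Int) (hk : 1 ≤ k)
    (asum : Int) (hasum : asum = h.sum) (W : Nat) (hWdef : W = (asum + 1).toNat) :
    ∀ (fuel p : Nat), p + fuel = h.length →
    ∀ (mat : List (List Bool)) (reach : PySem.Set Int),
    mat.length = p + 1 → (∀ ro ∈ mat, ro.length = W) →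
    (∀ j : Int, 0 ≤ j → j < (W : Int) → pvGetC mat 0 j = rch h 0 j) →
    (∀ r : Nat, 1 ≤ r → r ≤ p → ∀ j : Int, 0 ≤ j →
      j ≤ (if (h.take p).sum < 2 * k then 0 else PySem.Int.floordiv ((h.take p).sum) 2) →
      pvGetC mat (r : Int) j = rch h r j) →
    (∀ j : Int, j ∈ reach ↔ rch h p j = true) →
    pvOuterA h k asum (PySem.List.pyRange (p : Int) (h.length : Int) 1) mat ((h.take p).sum)
        (decide ((h.take p).sum < 2 * k))
      = pvAltLoop k (h.drop p) (p : Int) reach ((h.take p).sum) := by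
  have hasum0 : 0 ≤ asum := hasum ▸ List.sum_nonneg (fun x hx => hnn x hx)
  have hWint : (W : Int) = asum + 1 := by omega
  intro fuel
  induction fuel with
  | zero =>
    intro p hp mat reach _ _ _ _ _
    rw [PySem.List.pyRange_one_eq_nil (by omega), List.drop_eq_nil_of_le (by omega)]
    rfl
  | succ fuel ih =>
    intro p hp mat reach hlen hW hrow0 hinv hreach
    have hplt : p < h.length := by omega
    have hx : pvGetI h (p : Int) = h[p] := by
      rw [pvGetI_eq _ _ (by omega)]
      simp [List.getElem?_eq_getElem hplt]
    have hx0 : 0 ≤ h[p] := hnn _ (h.getElem_mem hplt)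
    have htot' : (h.take p).sum + h[p] = (h.take (p + 1)).sum := (sum_take_succ h p hplt).symm
    have htotnn := sum_take_nonneg h hnn p
    have htotnn' := sum_take_nonneg h hnn (p + 1)
    have htotle := sum_take_le h hnn (p + 1)
    have hcast : ((p : Int) + 1) = (((p + 1 : Nat)) : Int) := by push_cast; ring
    rw [PySem.List.pyRange_one_cons (by omega), List.drop_eq_getElem_cons hplt]
    rw [pvOuterA, pvAltLoop]
    simp only [hx, hcast, ← hWdef]
    have hreach' : ∀ j : Int,
        j ∈ PySem.Set.union reach (reach.map (fun s => s + h[p])) ↔ rch h (p + 1) j = true := by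
      intro j
      have := reach_step h hnn p hplt reach hreach j
      rw [hx] at this
      exact this
    obtain ⟨alen, aW, aold, anew⟩ := step_mat W (by omega) mat p hlen hW
    rw [hcast] at alen aW aold anew
    by_cases hq : 2 * k ≤ (h.take p).sum + h[p]
    · rw [if_pos hq]
      rw [show decide (2 * k ≤ (h.take p).sum + h[p]) = true from decide_eq_true hq]
      have hT1 : k ≤ PySem.Int.floordiv ((h.take p).sum + h[p]) 2 := by
        rw [PySem.Int.le_floordiv_iff_mul_le (by norm_num)]
        omega
      have hTW : PySem.Int.floordiv ((h.take p).sum + h[p]) 2 < (W : Int) := by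
        have h1 := floordiv_two_le_self (a := (h.take p).sum + h[p]) (by omega)
        rw [hWint]
        rw [htot'] at h1 ⊢
        omega
      have hrow0A : ∀ j : Int, 0 ≤ j → j < (W : Int) →
          pvGetC (pvSetC (mat ++ [List.replicate W false]) (((p + 1 : Nat)) : Int) 0 true) 0 j
            = rch h 0 j := by
        intro j hj1 hj2
        rw [aold 0 (by omega) (by omega) j hj1]
        exact hrow0 j hj1 hj2
      have hlastA : pvGetC (pvSetC (mat ++ [List.replicate W false]) (((p + 1 : Nat)) : Int) 0 true)
          (((p + 1 : Nat)) : Int) 0 = rch h (p + 1) 0 := by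
        rw [rch_zero]
        exact anew
      -- two cases for is_new; in each the old_total argument becomes concrete
      by_cases hnwc : (h.take p).sum < 2 * k
      · rw [show decide ((h.take p).sum < 2 * k) = true from decide_eq_true hnwc]
        rw [if_pos rfl]
        have hmid : ∀ r : Nat, 1 ≤ r → r < p + 1 → ∀ j : Int, 0 ≤ j → j ≤ (1 : Int) - 1 →
            pvGetC (pvSetC (mat ++ [List.replicate W false]) (((p + 1 : Nat)) : Int) 0 true) (r : Int) j
              = rch h r j := by
          intro r hr1 hr2 j hj1 hj2
          rw [aold (r : Int) (by omega) (by omega) j hj1]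
          apply hinv r hr1 (by omega) j hj1
          rw [if_pos hnwc]
          omega
        obtain ⟨flen, fW, frow0, fdone, ffound⟩ :=
          fmd_spec h hnn W ((h.take p).sum + h[p]) hTW (p + 1) (by omega) true 1 (le_refl _)
            (by rw [PySem.Int.le_floordiv_iff_mul_le (by norm_num)]; omega) (fun _ => rfl)
            (pvSetC (mat ++ [List.replicate W false]) (((p + 1 : Nat)) : Int) 0 true)
            (by rw [alen]) aW hrow0A hmid hlastA k hk
        have hany : (PySem.Set.union reach (reach.map (fun s => s + h[p]))).any
              (fun s => decide (k ≤ s) && decide (s ≤ PySem.Int.floordiv ((h.take p).sum + h[p]) 2))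
            = (pvFmd h (((p + 1 : Nat)) : Int) ((h.take p).sum + h[p]) true 1
                (pvSetC (mat ++ [List.replicate W false]) (((p + 1 : Nat)) : Int) 0 true) k).2 := by
          rcases hfound : (pvFmd h (((p + 1 : Nat)) : Int) ((h.take p).sum + h[p]) true 1
              (pvSetC (mat ++ [List.replicate W false]) (((p + 1 : Nat)) : Int) 0 true) k).2 with _ | _
          · rw [← Bool.not_eq_true]
            intro hcon
            rw [List.any_eq_true] at hcon
            obtain ⟨s, hs, hcond⟩ := hcon
            simp only [Bool.and_eq_true, decide_eq_true_eq] at hcond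
            have h2 : (pvFmd h (((p + 1 : Nat)) : Int) ((h.take p).sum + h[p]) true 1
                (pvSetC (mat ++ [List.replicate W false]) (((p + 1 : Nat)) : Int) 0 true) k).2 = true := by
              rw [ffound]
              exact ⟨s, hcond.1, hcond.2, (hreach' s).1 hs⟩
            rw [hfound] at h2
            exact absurd h2 (by simp)
          · obtain ⟨j, hj1, hj2, hj3⟩ := ffound.1 hfound
            rw [List.any_eq_true]
            exact ⟨j, (hreach' j).2 hj3,
              by simp only [Bool.and_eq_true, decide_eq_true_eq]; exact ⟨hj1, hj2⟩⟩
        rw [hany]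
        rcases hfound : (pvFmd h (((p + 1 : Nat)) : Int) ((h.take p).sum + h[p]) true 1
            (pvSetC (mat ++ [List.replicate W false]) (((p + 1 : Nat)) : Int) 0 true) k).2 with _ | _
        · rw [if_neg (by simp : ¬ ((false : Bool) = true)), if_neg (by simp : ¬ (((true : Bool) && false) = true))]
          have hrec := ih (p + 1) (by omega)
            (pvFmd h (((p + 1 : Nat)) : Int) ((h.take p).sum + h[p]) true 1
              (pvSetC (mat ++ [List.replicate W false]) (((p + 1 : Nat)) : Int) 0 true) k).1
            (PySem.Set.union reach (reach.map (fun s => s + h[p])))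
            flen fW
            (by
              intro j hj1 hj2
              rw [frow0 j hj1]
              exact hrow0A j hj1 hj2)
            (by
              intro r hr1 hr2 j hj1 hj2
              rw [if_neg (by omega)] at hj2
              rw [← htot'] at hj2
              exact fdone r hr1 hr2 j hj1 hj2)
            hreach'
          rw [show decide ((h.take (p + 1)).sum < 2 * k) = false from
            decide_eq_false (by omega), ← htot'] at hrec
          exact hrec
        · simp
      · rw [show decide ((h.take p).sum < 2 * k) = false from decide_eq_false hnwc]
        rw [if_neg (by simp : ¬ ((false : Bool) = true))]
        have he : (h.take p).sum + h[p] - h[p] = (h.take p).sum := by ring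
        rw [he]
        have hot1 : 1 ≤ PySem.Int.floordiv ((h.take p).sum) 2 := by
          rw [PySem.Int.le_floordiv_iff_mul_le (by norm_num)]
          omega
        have hotT : PySem.Int.floordiv ((h.take p).sum) 2 ≤
            PySem.Int.floordiv ((h.take p).sum + h[p]) 2 := floordiv_two_mono (by omega)
        have hmid : ∀ r : Nat, 1 ≤ r → r < p + 1 → ∀ j : Int, 0 ≤ j →
            j ≤ PySem.Int.floordiv ((h.take p).sum) 2 - 1 →
            pvGetC (pvSetC (mat ++ [List.replicate W false]) (((p + 1 : Nat)) : Int) 0 true) (r : Int) j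
              = rch h r j := by
          intro r hr1 hr2 j hj1 hj2
          rw [aold (r : Int) (by omega) (by omega) j hj1]
          apply hinv r hr1 (by omega) j hj1
          rw [if_neg hnwc]
          omega
        obtain ⟨flen, fW, frow0, fdone, ffound⟩ :=
          fmd_spec h hnn W ((h.take p).sum + h[p]) hTW (p + 1) (by omega) false
            (PySem.Int.floordiv ((h.take p).sum) 2) hot1 hotT (by simp)
            (pvSetC (mat ++ [List.replicate W false]) (((p + 1 : Nat)) : Int) 0 true)
            (by rw [alen]) aW hrow0A hmid hlastA k hk
        have hany : (PySem.Set.union reach (reach.map (fun s => s + h[p]))).any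
              (fun s => decide (k ≤ s) && decide (s ≤ PySem.Int.floordiv ((h.take p).sum + h[p]) 2))
            = (pvFmd h (((p + 1 : Nat)) : Int) ((h.take p).sum + h[p]) false
                (PySem.Int.floordiv ((h.take p).sum) 2)
                (pvSetC (mat ++ [List.replicate W false]) (((p + 1 : Nat)) : Int) 0 true) k).2 := by
          rcases hfound : (pvFmd h (((p + 1 : Nat)) : Int) ((h.take p).sum + h[p]) false
              (PySem.Int.floordiv ((h.take p).sum) 2)
              (pvSetC (mat ++ [List.replicate W false]) (((p + 1 : Nat)) : Int) 0 true) k).2 with _ | _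
          · rw [← Bool.not_eq_true]
            intro hcon
            rw [List.any_eq_true] at hcon
            obtain ⟨s, hs, hcond⟩ := hcon
            simp only [Bool.and_eq_true, decide_eq_true_eq] at hcond
            have h2 : (pvFmd h (((p + 1 : Nat)) : Int) ((h.take p).sum + h[p]) false
                (PySem.Int.floordiv ((h.take p).sum) 2)
                (pvSetC (mat ++ [List.replicate W false]) (((p + 1 : Nat)) : Int) 0 true) k).2 = true := by
              rw [ffound]
              exact ⟨s, hcond.1, hcond.2, (hreach' s).1 hs⟩
            rw [hfound] at h2
            exact absurd h2 (by simp)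
          · obtain ⟨j, hj1, hj2, hj3⟩ := ffound.1 hfound
            rw [List.any_eq_true]
            exact ⟨j, (hreach' j).2 hj3,
              by simp only [Bool.and_eq_true, decide_eq_true_eq]; exact ⟨hj1, hj2⟩⟩
        rw [hany]
        rcases hfound : (pvFmd h (((p + 1 : Nat)) : Int) ((h.take p).sum + h[p]) false
            (PySem.Int.floordiv ((h.take p).sum) 2)
            (pvSetC (mat ++ [List.replicate W false]) (((p + 1 : Nat)) : Int) 0 true) k).2 with _ | _
        · rw [if_neg (by simp : ¬ ((false : Bool) = true)), if_neg (by simp : ¬ (((true : Bool) && false) = true))]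
          have hrec := ih (p + 1) (by omega)
            (pvFmd h (((p + 1 : Nat)) : Int) ((h.take p).sum + h[p]) false
              (PySem.Int.floordiv ((h.take p).sum) 2)
              (pvSetC (mat ++ [List.replicate W false]) (((p + 1 : Nat)) : Int) 0 true) k).1
            (PySem.Set.union reach (reach.map (fun s => s + h[p])))
            flen fW
            (by
              intro j hj1 hj2
              rw [frow0 j hj1]
              exact hrow0A j hj1 hj2)
            (by
              intro r hr1 hr2 j hj1 hj2
              rw [if_neg (by omega)] at hj2
              rw [← htot'] at hj2
              exact fdone r hr1 hr2 j hj1 hj2)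
            hreach'
          rw [show decide ((h.take (p + 1)).sum < 2 * k) = false from
            decide_eq_false (by omega), ← htot'] at hrec
          exact hrec
        · simp
    · rw [if_neg hq]
      rw [show decide (2 * k ≤ (h.take p).sum + h[p]) = false from decide_eq_false hq]
      simp only [Bool.false_and]
      rw [if_neg (by simp : ¬ ((false : Bool) = true))]
      have hrec := ih (p + 1) (by omega)
        (pvSetC (mat ++ [List.replicate W false]) (((p + 1 : Nat)) : Int) 0 true)
        (PySem.Set.union reach (reach.map (fun s => s + h[p])))
        alen aW
        (by
          intro j hj1 hj2
          rw [aold 0 (by omega) (by omega) j hj1]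
          exact hrow0 j hj1 hj2)
        (by
          intro r hr1 hr2 j hj1 hj2
          rw [if_pos (by omega : (h.take (p + 1)).sum < 2 * k)] at hj2
          have hj0 : j = 0 := by omega
          subst hj0
          rcases Nat.lt_or_ge r (p + 1) with hrlt | hrge
          · rw [aold (r : Int) (by omega) (by omega) 0 (by omega)]
            apply hinv r hr1 (by omega) 0 (by omega)
            split <;> [omega; exact floordiv_two_nonneg htotnn]
          · have hre : r = p + 1 := by omega
            subst hre
            rw [rch_zero]
            exact anew)
        hreach'
      rw [show decide ((h.take (p + 1)).sum < 2 * k) = true from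
        decide_eq_true (by omega), ← htot'] at hrec
      have hnwc : (h.take p).sum < 2 * k := by omega
      rw [show decide ((h.take p).sum < 2 * k) = true from decide_eq_true hnwc]
      exact hrec

lemma greedy_eq (h : List Int) (n k : Int) : ∀ i B : Int,
    pvGreedyA h n k i B = pvGreedyB h n k i B := by
  intro i B
  fun_induction pvGreedyA h n k i B with
  | case1 i B hc ih =>
    rw [pvGreedyB, dif_pos hc]
    exact ih
  | case2 i B hc =>
    rw [pvGreedyB, dif_neg hc]

-- the first element of the descending sort bounds every element
lemma le_sorted_head (h_ : List Int) (x : Int)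
    (hx : x ∈ PySem.List.sorted h_ (fun y => y) true) :
    x ≤ pvGetI (PySem.List.sorted h_ (fun y => y) true) 0 := by
  have hpw := PySem.List.sorted_pairwise_rev h_ (fun y => y)
  rcases hhs : PySem.List.sorted h_ (fun y => y) true with _ | ⟨y, t⟩
  · rw [hhs] at hx
    simp at hx
  · rw [hhs] at hx hpw
    rw [pvGetI_eq _ _ (le_refl 0)]
    simp only [Int.toNat_zero, List.getElem?_cons_zero, Option.getD_some]
    rcases List.mem_cons.1 hx with rfl | hx
    · exact le_refl x
    · exact (List.pairwise_cons.1 hpw).1 x hx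

theorem main_eq (n : Int) (k : Int) (h_ : List Int)
    (hpre : (n = 1 ∨ h_.sum < 2 * k) ∨
      (h_ ≠ [] ∧ (∃ x ∈ h_, k ≤ x) ∧
        (n ≤ h_.length ∨ h_.sum = 2 * k ∨ ∀ x ∈ h_, k + x ≤ h_.sum)) ∨
      (n = h_.length ∧ 1 ≤ n ∧ ∀ x ∈ h_, 0 ≤ x)) :
    solution n k h_ = solution_alt n k h_ := by
  rw [solution, solution_alt]
  simp only []
  by_cases hc1 : (n == 1 || decide (h_.sum < 2 * k)) = true
  · rw [if_pos hc1, if_pos hc1]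
  · rw [if_neg hc1, if_neg hc1]
    have hc1' : ¬ (n = 1 ∨ h_.sum < 2 * k) := by
      simp only [Bool.or_eq_true, beq_iff_eq, decide_eq_true_eq] at hc1
      tauto
    set hs := PySem.List.sorted h_ (fun x => x) true with hhs
    have hperm : hs.Perm h_ := PySem.List.sorted_perm h_ (fun x => x) true
    have hslen : hs.length = h_.length := hperm.length_eq
    have hssum : hs.sum = h_.sum := hperm.sum_eq
    by_cases hc2 : (h_.sum == 2 * k && decide (k < pvGetI hs 0)) = true
    · rw [if_pos hc2, if_pos hc2]
    · rw [if_neg hc2, if_neg hc2]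
      by_cases hc3 : (h_.sum == 2 * k && pvGetI hs 0 == k) = true
      · rw [if_pos hc3, if_pos hc3]
      · rw [if_neg hc3, if_neg hc3]
        by_cases hc4 : k ≤ pvGetI hs 0
        · rw [if_pos hc4, if_pos hc4, greedy_eq]
        · rw [if_neg hc4, if_neg hc4]
          -- DP branch: the shared front branches were not taken, so Pre_'s last
          -- disjunct must hold
          obtain ⟨hn, hn1, hnn⟩ :
              n = h_.length ∧ 1 ≤ n ∧ ∀ x ∈ h_, 0 ≤ x := by
            rcases hpre with hC | ⟨hne, ⟨x, hxmem, hkx⟩, _⟩ | hC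
            · exact absurd hC hc1'
            · exact absurd (le_trans hkx (le_sorted_head h_ x (hperm.mem_iff.2 hxmem)))
                hc4
            · exact hC
          have hsnn : ∀ x ∈ hs, 0 ≤ x := fun x hx => hnn x (hperm.mem_iff.1 hx)
          have hlen1 : 1 ≤ h_.length := by omega
          have hs0 : 0 ≤ pvGetI hs 0 := pvGetI_nonneg hs hsnn 0 (le_refl 0)
          have hk : 1 ≤ k := by omega
          have hasum0 : 0 ≤ h_.sum := List.sum_nonneg hnn
          set W : Nat := (h_.sum + 1).toNat with hWdef
          have hW1 : 1 ≤ W := by omega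
          have hWint : (W : Int) = h_.sum + 1 := by omega
          -- initial matrix
          have hrow0 : ∀ j : Int, 0 ≤ j → j < (W : Int) →
              pvGetC [PySem.List.pySetD (List.replicate W false) 0 true] 0 j = rch hs 0 j := by
            intro j hj1 hj2
            rw [pvGetC_eq _ _ _ (le_refl 0) hj1]
            rw [PySem.List.pySetD_of_nonneg (h := le_refl 0)]
            simp only [Int.toNat_zero, List.getElem?_cons_zero, Option.getD_some]
            have hjW : j.toNat < W := by omega
            rcases Int.lt_or_le 0 j with hj | hj
            · rw [List.getElem?_set_ne (by omega), List.getElem?_replicate_of_lt hjW]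
              simp [rch]
              omega
            · have hj0 : j = 0 := by omega
              subst hj0
              simp only [Int.toNat_zero]
              rw [List.getElem?_set_self (by simp [List.length_replicate]; omega), Option.getD_some]
              simp [rch]
          have hmain := outer_eq hs hsnn k hk h_.sum hssum.symm W hWdef
            hs.length 0 (by omega)
            [PySem.List.pySetD (List.replicate W false) 0 true]
            (PySem.Set.ofList [0])
            (by simp [PySem.List.length_pySetD])
            (by
              intro ro hro
              simp only [List.mem_singleton] at hro
              subst hro
              rw [PySem.List.pySetD_of_nonneg (h := le_refl 0)]
              simp [List.length_set, List.length_replicate])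
            hrow0
            (by intro r hr1 hr2; omega)
            (by
              intro j
              rw [PySem.Set.mem_ofList]
              simp [rch])
          rw [List.take_zero, List.sum_nil, List.drop_zero] at hmain
          rw [show decide ((0 : Int) < 2 * k) = true from decide_eq_true (by omega)] at hmain
          rw [show ((0 : Nat) : Int) = 0 from rfl] at hmain
          rw [show (hs.length : Int) = n from by omega] at hmain
          exact hmain

-- ===== VERDICT (by name: the statement is the Claim_ definition above) =====
theorem solution_spec : Claim_equal_solution := by
  intro n k h_ _ hpre
  show solution n k h_ = solution_alt n k h_
  exact main_eq n k h_ hpre
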